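-- pv_equiv track=rewrite | github.com/daniel-reich/ubiquitous-fiesta | mrrKngM2fqDEDMXtS_17.py | can_patch
-- ===== SOURCE A (Python) =====
-- def can_patch(bridge, planks):
--     string = ''.join([str(i) for i in bridge])
--     result = sorted(list(filter(lambda x: x!=0, [len(i)-1 for i in string.replace('1', ' ').split()])), reverse= True)
--     if len(result) > len(planks):
--         return False
--     else:
--         for i in result:
--             if i in planks:
--                 pass
--             else:
--                 return False
--         return True
-- ===== SOURCE B (Python) =====
-- def can_patch(bridge, planks):
--     s = ''.join(str(i) for i in bridge)
--     gaps = []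
--     run = 0
--     for ch in s:
--         if ch == '1':
--             if run >= 2:
--                 gaps.append(run - 1)
--             run = 0
--         else:
--             run += 1
--     if run >= 2:
--         gaps.append(run - 1)
--     if len(gaps) > len(planks):
--         return False
--     return all(g in planks for g in gaps)
-- ===== Notes on version B (the rewrite author's own statement) =====
-- stated objective: simpler
-- what changed: Replaces the replace('1',' ')/split/comprehension/filter/sort pipeline with a single character scan keeping a running run-length counter, and drops the sort entirely since only the multiset of gap sizes matters for the length guard and the membership test.
import Mathlib
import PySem

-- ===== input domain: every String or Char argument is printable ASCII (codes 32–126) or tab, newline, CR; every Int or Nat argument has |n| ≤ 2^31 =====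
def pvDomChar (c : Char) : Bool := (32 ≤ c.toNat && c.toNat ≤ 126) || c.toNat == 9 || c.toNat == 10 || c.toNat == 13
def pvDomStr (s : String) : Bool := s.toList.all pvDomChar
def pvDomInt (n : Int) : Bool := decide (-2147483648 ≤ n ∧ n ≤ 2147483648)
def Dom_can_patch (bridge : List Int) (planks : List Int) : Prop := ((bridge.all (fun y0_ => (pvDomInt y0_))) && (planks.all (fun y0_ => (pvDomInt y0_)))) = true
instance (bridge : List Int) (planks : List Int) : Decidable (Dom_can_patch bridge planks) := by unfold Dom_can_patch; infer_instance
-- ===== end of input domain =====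

-- ===== PORT A =====
-- B replaces the replace/split/filter/sort pipeline by a single run-length scan of the same
-- joined digit string (objective: simpler; the sort is dropped since only multiset membership matters).
def canPatchLoop (result : List Int) (planks : List Int) : Bool :=
  match result with
  | [] => true
  | i :: rest => if planks.contains i then canPatchLoop rest planks else false

def can_patch (bridge : List Int) (planks : List Int) : Bool :=
  let string := PySem.Str.join "" (bridge.map (fun i => PySem.Int.toStr i))
  let result := PySem.List.sorted
      (((PySem.Str.split₀ (PySem.Str.replace string "1" " ")).map
          (fun i => PySem.Str.len i - 1)).filter (fun x => x != 0))
      (fun x => x) true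
  if result.length > planks.length then false
  else canPatchLoop result planks

-- ===== PORT B =====
def can_patch_alt (bridge : List Int) (planks : List Int) : Bool :=
  let s := PySem.Str.join "" (bridge.map (fun i => PySem.Int.toStr i))
  let st := s.toList.foldl
      (fun (st : List Int × Nat) ch =>
        if ch = '1' then
          (if st.2 ≥ 2 then st.1 ++ [(st.2 : Int) - 1] else st.1, 0)
        else (st.1, st.2 + 1))
      ([], 0)
  let gaps := if st.2 ≥ 2 then st.1 ++ [(st.2 : Int) - 1] else st.1
  if gaps.length > planks.length then false
  else gaps.all (fun g => planks.contains g)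

-- ===== PRECONDITION & SPEC =====
def Spec_can_patch (bridge : List Int) (planks : List Int) (out : Bool) : Prop := out = can_patch_alt bridge planks
instance (bridge : List Int) (planks : List Int) (out : Bool) : Decidable (Spec_can_patch bridge planks out) := by unfold Spec_can_patch; infer_instance

-- ===== CLAIM (what is proved, stated in full; the proofs are below) =====
def Claim_equal_can_patch : Prop := ∀ (bridge : List Int) (planks : List Int), Dom_can_patch bridge planks → Spec_can_patch bridge planks (can_patch bridge planks)

-- ===== LEMMAS AND PROOFS =====

-- the char substitution performed by replace('1', ' ') on a single character
def rpl (c : Char) : Char := if c = '1' then ' ' else c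

-- A's list of gap sizes before sorting
def gapsOf (ps : List (List Char)) : List Int :=
  (ps.map (fun p => ((p.length : Int) - 1))).filter (fun x => x != 0)

-- B's scan, written as a recursion for the proofs
def scanRuns : List Char → Nat → List Int
  | [], run => if run ≥ 2 then [(run : Int) - 1] else []
  | c :: t, run =>
      if c = '1' then (if run ≥ 2 then ((run : Int) - 1) :: scanRuns t 0 else scanRuns t 0)
      else scanRuns t (run + 1)

theorem dc_nospace : ∀ d, PySem.Chars.isspace (Nat.digitChar d) = false := by
  intro d
  rcases d with _|_|_|_|_|_|_|_|_|_|_|_|_|_|_|_|d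
  case _ => decide
  case _ => decide
  case _ => decide
  case _ => decide
  case _ => decide
  case _ => decide
  case _ => decide
  case _ => decide
  case _ => decide
  case _ => decide
  case _ => decide
  case _ => decide
  case _ => decide
  case _ => decide
  case _ => decide
  case _ => decide
  case _ =>
    have h : Nat.digitChar (d + 16) = '*' := by
      unfold Nat.digitChar
      repeat rw [if_neg (by omega)]
    rw [h]; decide

theorem toDigitsCore_nospace (fuel : Nat) : ∀ (n : Nat) (ds : List Char),
    (∀ c ∈ ds, PySem.Chars.isspace c = false) →
    ∀ c ∈ Nat.toDigitsCore 10 fuel n ds, PySem.Chars.isspace c = false := by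
  induction fuel with
  | zero => intro n ds h c hc; simp [Nat.toDigitsCore] at hc; exact h c hc
  | succ f ih =>
    intro n ds h c hc
    simp only [Nat.toDigitsCore] at hc
    split at hc
    · rcases List.mem_cons.mp hc with h1 | h1
      · subst h1; exact dc_nospace _
      · exact h c h1
    · refine ih _ _ ?_ c hc
      intro c' hc'
      rcases List.mem_cons.mp hc' with h1 | h1
      · subst h1; exact dc_nospace _
      · exact h c' h1

theorem toChars_nospace (n : Int) : ∀ c ∈ PySem.Int.toChars n, PySem.Chars.isspace c = false := by
  intro c hc
  unfold PySem.Int.toChars at hc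
  split at hc
  · rcases List.mem_cons.mp hc with h1 | h1
    · subst h1; decide
    · exact toDigitsCore_nospace _ _ [] (by simp) c h1
  · exact toDigitsCore_nospace _ _ [] (by simp) c hc

theorem join_nil_flatten (ps : List (List Char)) : PySem.Chars.join [] ps = ps.flatten := by
  induction ps with
  | nil => simp [PySem.Chars.join_nil]
  | cons p rest ih =>
    cases rest with
    | nil => simp [PySem.Chars.join_singleton]
    | cons q t => rw [PySem.Chars.join_cons_cons, ih]; simp

theorem joined_nospace (bridge : List Int) :
    ∀ c ∈ (PySem.Str.join "" (bridge.map (fun i => PySem.Int.toStr i))).toList,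
      PySem.Chars.isspace c = false := by
  intro c hc
  rw [PySem.Str.toList_join] at hc
  simp only [String.toList_empty] at hc
  rw [join_nil_flatten] at hc
  rcases List.mem_flatten.mp hc with ⟨p, hp, hcp⟩
  simp only [List.map_map, List.mem_map] at hp
  rcases hp with ⟨i, _, rfl⟩
  simp only [Function.comp_apply, PySem.Int.toList_toStr] at hcp
  exact toChars_nospace i c hcp

theorem replace_go_map (cs : List Char) : ∀ (acc : List Char) (fuel : Nat), cs.length ≤ fuel →
    PySem.Chars.replace.go ['1'] [' '] fuel cs acc = acc.reverse ++ cs.map rpl := by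
  induction cs with
  | nil =>
    intro acc fuel _
    cases fuel <;> simp [PySem.Chars.replace.go]
  | cons c t ih =>
    intro acc fuel hf
    cases fuel with
    | zero => simp at hf
    | succ f =>
      simp only [PySem.Chars.replace.go, List.isPrefixOf]
      by_cases h1 : c = '1'
      · subst h1
        simp only [beq_self_eq_true, Bool.true_and, if_pos]
        have hd : List.drop (['1'] : List Char).length ('1' :: t) = t := by simp
        rw [hd, ih _ f (by simpa using hf)]
        simp [rpl]
      · rw [if_neg (by simp [h1]; intro h; exact h1 h.symm)]
        rw [ih _ f (by simpa using hf)]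
        simp [rpl, h1]

theorem replace_eq_map (cs : List Char) :
    PySem.Chars.replace cs ['1'] [' '] = cs.map rpl := by
  unfold PySem.Chars.replace
  rw [if_neg (by simp)]
  exact replace_go_map cs [] cs.length le_rfl

theorem gapsOf_append (ps qs : List (List Char)) :
    gapsOf (ps ++ qs) = gapsOf ps ++ gapsOf qs := by
  simp [gapsOf]

theorem gapsOf_single (p : List Char) (hp : p ≠ []) :
    gapsOf [p] = if p.length ≥ 2 then [(p.length : Int) - 1] else [] := by
  have h1 : 1 ≤ p.length := List.length_pos_iff.mpr hp
  simp only [gapsOf, List.map_cons, List.map_nil, List.filter]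
  by_cases h2 : p.length ≥ 2
  · rw [if_pos h2]
    have : ((p.length : Int) - 1 != 0) = true := by simp; omega
    simp [this]
  · rw [if_neg h2]
    have hl : p.length = 1 := by omega
    simp [hl]

theorem split_go_scan (cs : List Char) : ∀ (cur : List Char) (acc : List (List Char)),
    (∀ c ∈ cs, PySem.Chars.isspace c = false) →
    gapsOf (PySem.Chars.split₀.go (cs.map rpl) cur acc) =
      gapsOf acc.reverse ++ scanRuns cs cur.length := by
  induction cs with
  | nil =>
    intro cur acc _
    simp only [List.map_nil, PySem.Chars.split₀.go, scanRuns]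
    by_cases h : cur.isEmpty
    · rw [if_pos h]
      have : cur.length = 0 := by simpa [List.isEmpty_iff_length_eq_zero] using h
      simp [this]
    · rw [if_neg h]
      have hne : cur ≠ [] := by simpa [List.isEmpty_iff] using h
      rw [List.reverse_cons, gapsOf_append, gapsOf_single _ (by simpa using hne)]
      simp
  | cons c t ih =>
    intro cur acc hns
    have hct : ∀ c' ∈ t, PySem.Chars.isspace c' = false := fun c' h => hns c' (List.mem_cons_of_mem _ h)
    have hcs : PySem.Chars.isspace c = false := hns c List.mem_cons_self
    simp only [List.map_cons, PySem.Chars.split₀.go, scanRuns]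
    by_cases h1 : c = '1'
    · subst h1
      have hsp : PySem.Chars.isspace (rpl '1') = true := by decide
      rw [if_pos hsp]
      by_cases h2 : cur.isEmpty
      · rw [if_pos h2]
        have h0 : cur.length = 0 := by simpa [List.isEmpty_iff_length_eq_zero] using h2
        rw [ih [] acc hct]
        simp [h0]
      · rw [if_neg h2]
        have hne : cur ≠ [] := by simpa [List.isEmpty_iff] using h2
        rw [ih [] _ hct]
        rw [List.reverse_cons, gapsOf_append, gapsOf_single _ (by simpa using hne)]
        by_cases h3 : cur.length ≥ 2
        · simp [h3]
        · simp [h3]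
    · have hsp : PySem.Chars.isspace (rpl c) = false := by simpa [rpl, h1] using hcs
      rw [if_neg (by simp [hsp])]
      rw [if_neg h1]
      have := ih (rpl c :: cur) acc hct
      simpa using this

theorem scan_fold (cs : List Char) : ∀ (g : List Int) (run : Nat),
    (let st := cs.foldl
        (fun (st : List Int × Nat) ch =>
          if ch = '1' then
            (if st.2 ≥ 2 then st.1 ++ [(st.2 : Int) - 1] else st.1, 0)
          else (st.1, st.2 + 1)) (g, run)
     if st.2 ≥ 2 then st.1 ++ [(st.2 : Int) - 1] else st.1) = g ++ scanRuns cs run := by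
  induction cs with
  | nil =>
    intro g run
    simp only [List.foldl_nil, scanRuns]
    by_cases h : run ≥ 2 <;> simp [h]
  | cons c t ih =>
    intro g run
    simp only [List.foldl_cons, scanRuns]
    by_cases h1 : c = '1'
    · subst h1
      rw [if_pos rfl, if_pos rfl]
      by_cases h2 : run ≥ 2
      · rw [if_pos h2, if_pos h2, ih]
        simp
      · rw [if_neg h2, if_neg h2, ih]
    · rw [if_neg h1, if_neg h1, ih]

theorem canPatchLoop_all (l p : List Int) :
    canPatchLoop l p = l.all (fun i => p.contains i) := by
  induction l with
  | nil => simp [canPatchLoop]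
  | cons i t ih =>
    simp only [canPatchLoop, List.all_cons, ih]
    by_cases h : p.contains i <;> simp [h]


theorem gapsOf_split (bridge : List Int) :
    let s := PySem.Str.join "" (bridge.map (fun i => PySem.Int.toStr i))
    ((PySem.Str.split₀ (PySem.Str.replace s "1" " ")).map
        (fun i => PySem.Str.len i - 1)).filter (fun x => x != 0) =
      scanRuns s.toList 0 := by
  intro s
  have h1 : (PySem.Str.replace s "1" " ").toList = s.toList.map rpl := by
    rw [PySem.Str.toList_replace]
    exact replace_eq_map s.toList
  have h2 : PySem.Str.split₀ (PySem.Str.replace s "1" " ") =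
      (PySem.Chars.split₀ (s.toList.map rpl)).map String.ofList := by
    unfold PySem.Str.split₀
    rw [h1]
  rw [h2]
  have h3 : ((PySem.Chars.split₀ (s.toList.map rpl)).map String.ofList).map
      (fun i => PySem.Str.len i - 1) =
      (PySem.Chars.split₀ (s.toList.map rpl)).map (fun p => ((p.length : Int) - 1)) := by
    simp [PySem.Str.len]
  rw [h3]
  have h4 := split_go_scan s.toList [] [] (joined_nospace bridge)
  simpa [PySem.Chars.split₀, gapsOf] using h4

-- ===== VERDICT (by name: the statement is the Claim_ definition above) =====
theorem can_patch_spec : Claim_equal_can_patch := by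
  intro bridge planks _
  unfold Spec_can_patch
  dsimp only [can_patch, can_patch_alt]
  have hg := gapsOf_split bridge
  simp only at hg
  rw [hg]
  have hs := scan_fold (PySem.Str.join "" (bridge.map (fun i => PySem.Int.toStr i))).toList [] 0
  simp only [List.nil_append] at hs
  rw [hs]
  have hp := PySem.List.sorted_perm
      (scanRuns (PySem.Str.join "" (bridge.map (fun i => PySem.Int.toStr i))).toList 0)
      (fun x => x) true
  rw [hp.length_eq, canPatchLoop_all, hp.all_eq]
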